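-- pv_equiv track=rewrite | github.com/nldvos/vpw_gent_2020 | tripartite/tripartite.py | solve
-- ===== SOURCE A (Python) =====
-- def accumulate(l):
--     res = [l[0]]
--
--     for i in range(1, len(l)):
--         res.append(l[i] + res[i-1])
--
--     res.append(res[-1])
--     res.insert(0, 0)
--     return res
--
-- def solve(l):
--     count = 0
--
--     if len(l) == 0:
--         return 0
--
--     acc_l = accumulate(l)
--
--     # print ("{}".format(l))
--     # print ("{}".format(acc_l))
--
--     for i in range(1 + len(l)):
--         for j in range(i, 1 + len(l)):
--             part1 = acc_l[i]
--             part2 = acc_l[j + 1] - acc_l[i]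
--             part3 = acc_l[-1] - acc_l[i + 1]
--             if part1 == part2 and part2 == part3:
--                 count += 1
--             # print ("{} {} {} {} {}".format(i, j, part1, part2, part3))
--
--
--     return count
-- ===== SOURCE B (Python) =====
-- def solve(l):
--     # One backward pass with a value->count dict over suffix prefix-sums
--     # instead of A's nested O(n^2) scan.
--     if not l:
--         return 0
--     acc = [0]
--     for x in l:
--         acc.append(acc[-1] + x)
--     total = acc[-1]
--     acc.append(total)  # sentinel matching A's acc_l[n+1]
--     cnt = {}
--     count = 0
--     for i in range(len(l), -1, -1):
--         v = acc[i + 1]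
--         cnt[v] = cnt.get(v, 0) + 1
--         if acc[i] == total - acc[i + 1]:
--             count += cnt.get(2 * acc[i], 0)
--     return count
-- ===== Notes on version B (the rewrite author's own statement) =====
-- stated objective: faster
-- what changed: Replaces A's nested O(n^2) pair scan with a single backward pass that maintains a value->count dictionary of suffix prefix-sums, so the inner loop disappears.
import Mathlib
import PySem

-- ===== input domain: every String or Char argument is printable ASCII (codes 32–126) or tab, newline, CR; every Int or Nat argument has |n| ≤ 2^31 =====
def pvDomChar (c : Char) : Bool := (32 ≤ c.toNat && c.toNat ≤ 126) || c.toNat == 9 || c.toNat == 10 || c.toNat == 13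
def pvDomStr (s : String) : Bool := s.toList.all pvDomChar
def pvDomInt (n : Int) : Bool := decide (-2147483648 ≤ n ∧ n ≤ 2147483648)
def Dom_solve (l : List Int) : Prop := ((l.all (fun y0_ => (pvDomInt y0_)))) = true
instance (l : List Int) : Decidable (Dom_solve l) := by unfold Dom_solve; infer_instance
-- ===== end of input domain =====

-- B replaces A's nested O(n^2) pair scan by one backward pass with a value->count
-- dictionary of suffix prefix-sums (objective: faster, asymptotic).

-- ===== PORT A =====
-- All list indices below are provably in range, so pyGetD _ _ 0 agrees with Python's
-- raising indexing on every reachable access.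
def pvAccA (l : List Int) : List Int :=
  let res := [PySem.List.pyGetD l 0 0]
  let res := (PySem.List.pyRange 1 (l.length : Int) 1).foldl
    (fun r i => r ++ [PySem.List.pyGetD l i 0 + PySem.List.pyGetD r (i - 1) 0]) res
  let res := res ++ [PySem.List.pyGetD res (-1) 0]
  PySem.List.insert res 0 0

def solve (l : List Int) : Int :=
  if l.length = 0 then 0
  else
    let acc := pvAccA l
    (PySem.List.pyRange 0 (1 + (l.length : Int)) 1).foldl (fun count i =>
      (PySem.List.pyRange i (1 + (l.length : Int)) 1).foldl (fun count j =>
        let part1 := PySem.List.pyGetD acc i 0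
        let part2 := PySem.List.pyGetD acc (j + 1) 0 - PySem.List.pyGetD acc i 0
        let part3 := PySem.List.pyGetD acc (-1) 0 - PySem.List.pyGetD acc (i + 1) 0
        if part1 == part2 && part2 == part3 then count + 1 else count) count) 0

-- ===== PORT B =====
def solve_alt (l : List Int) : Int :=
  if l = [] then 0
  else
    let acc := l.foldl (fun a x => a ++ [PySem.List.pyGetD a (-1) 0 + x]) [(0 : Int)]
    let total := PySem.List.pyGetD acc (-1) 0
    let acc := acc ++ [total]
    let st := (PySem.List.pyRange (l.length : Int) (-1) (-1)).foldl
      (fun (s : PySem.Dict Int Int × Int) i =>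
        let v := PySem.List.pyGetD acc (i + 1) 0
        let cnt := s.1.insert v (s.1.getD v 0 + 1)
        let count := if PySem.List.pyGetD acc i 0 == total - PySem.List.pyGetD acc (i + 1) 0
          then s.2 + cnt.getD (2 * PySem.List.pyGetD acc i 0) 0
          else s.2
        (cnt, count)) (PySem.Dict.empty, 0)
    st.2

-- ===== PRECONDITION & SPEC =====
def Spec_solve (l : List Int) (out : Int) : Prop := out = solve_alt l
instance (l : List Int) (out : Int) : Decidable (Spec_solve l out) := by unfold Spec_solve; infer_instance

-- ===== CLAIM (what is proved, stated in full; the proofs are below) =====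
def Claim_equal_solve : Prop := ∀ (l : List Int), Dom_solve l → Spec_solve l (solve l)

-- ===== LEMMAS AND PROOFS =====

-- closed form of the accumulator list both programs build
def pvAccL (l : List Int) : List Int :=
  ((List.range (l.length + 1)).map (fun k => (l.take k).sum)) ++ [l.sum]

theorem pvGetD_concat_neg_one {α : Type} (xs : List α) (x d : α) :
    PySem.List.pyGetD (xs ++ [x]) (-1) d = x := by
  simp [PySem.List.pyGetD, PySem.List.pyGet?, PySem.List.pyIdx?]

theorem pvAccB_eq (l : List Int) :
    l.foldl (fun a x => a ++ [PySem.List.pyGetD a (-1) 0 + x]) [(0 : Int)]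
      = (List.range (l.length + 1)).map (fun k => (l.take k).sum) := by
  induction l using List.reverseRecOn with
  | nil => simp
  | append_singleton t x ih =>
      rw [List.foldl_append, ih]
      simp only [List.foldl_cons, List.foldl_nil]
      rw [List.range_succ, List.map_append, List.map_singleton]
      rw [pvGetD_concat_neg_one, List.take_length]
      rw [List.length_append, List.length_singleton]
      rw [List.range_succ (n := t.length + 1), List.map_append, List.map_singleton]
      congr 1
      · rw [List.range_succ, List.map_append, List.map_singleton]
        congr 1
        · apply List.map_congr_left
          intro k hk
          rw [List.mem_range] at hk
          rw [List.take_append_of_le_length (by omega)]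
        · rw [List.take_append_of_le_length le_rfl, List.take_length]
      · rw [List.take_of_length_le (by simp)]
        simp

theorem pvAccA_loop (l : List Int) (m : ℕ) (h1 : 1 ≤ m) (h2 : m ≤ l.length) :
    (PySem.List.pyRange 1 (m : Int) 1).foldl
        (fun r i => r ++ [PySem.List.pyGetD l i 0 + PySem.List.pyGetD r (i - 1) 0])
        [PySem.List.pyGetD l 0 0]
      = (List.range m).map (fun k => (l.take (k + 1)).sum) := by
  induction m, h1 using Nat.le_induction with
  | base =>
      rw [Nat.cast_one, PySem.List.pyRange_one_eq_nil le_rfl]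
      have h0 : (0 : Int) = ((0 : ℕ) : Int) := rfl
      rw [List.foldl_nil, h0, PySem.List.pyGetD_natCast]
      have hlt : 0 < l.length := by omega
      simp [List.getD, List.sum_take_succ l 0 hlt, List.getElem?_eq_getElem hlt]
  | succ m hm ih =>
      have ih' := ih (by omega)
      have hcast : ((m + 1 : ℕ) : Int) = (m : Int) + 1 := by push_cast; ring
      rw [hcast, PySem.List.pyRange_one_succ_right (by exact_mod_cast hm), List.foldl_append,
        List.foldl_cons, List.foldl_nil, ih']
      have hm1 : ((m : Int)) - 1 = ((m - 1 : ℕ) : Int) := by omega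
      rw [hm1, PySem.List.pyGetD_natCast, PySem.List.pyGetD_natCast]
      have hmlt : m < l.length := by omega
      have hm1lt : m - 1 < m := by omega
      rw [List.range_succ, List.map_append, List.map_singleton]
      congr 1
      have : (List.map (fun k => (List.take (k + 1) l).sum) (List.range m)).getD (m - 1) 0
          = (l.take m).sum := by
        rw [List.getD_eq_getElem?_getD, List.getElem?_map,
          List.getElem?_range hm1lt]
        simp only [Option.map_some, Option.getD_some]
        rw [show m - 1 + 1 = m from by omega]
      rw [this, List.getD_eq_getElem?_getD, List.getElem?_eq_getElem hmlt]
      simp only [Option.getD_some]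
      rw [List.sum_take_succ l m hmlt]
      rw [Int.add_comm]

theorem pvLast_prefix (l : List Int) :
    PySem.List.pyGetD ((List.range (l.length + 1)).map (fun k => (l.take k).sum)) (-1) 0
      = l.sum := by
  rw [List.range_succ, List.map_append, List.map_singleton, pvGetD_concat_neg_one,
    List.take_length]

theorem pvLast_accL (l : List Int) :
    PySem.List.pyGetD (pvAccL l) (-1) 0 = l.sum := by
  rw [pvAccL, pvGetD_concat_neg_one]

theorem pvAccA_eq (l : List Int) (hl : l ≠ []) : pvAccA l = pvAccL l := by
  have hlen : 1 ≤ l.length := by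
    cases l with | nil => simp at hl | cons a t => simp
  rw [pvAccA, pvAccA_loop l l.length hlen le_rfl]
  -- res ++ [res[-1]] where res = map over range l.length, last = l.sum
  have hres : (List.range l.length).map (fun k => (l.take (k + 1)).sum)
      = (List.range (l.length - 1)).map (fun k => (l.take (k + 1)).sum) ++ [l.sum] := by
    conv_lhs => rw [show l.length = (l.length - 1) + 1 by omega]
    rw [List.range_succ, List.map_append, List.map_singleton]
    congr 2
    rw [show l.length - 1 + 1 = l.length by omega, List.take_length]
  rw [hres, pvGetD_concat_neg_one, ← hres, PySem.List.insert_zero, pvAccL]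
  rw [List.range_succ_eq_map, List.map_cons, List.map_map]
  simp only [List.take_zero, List.sum_nil]
  rfl

def pvStep (f : Int → Int) (T : Int) (s : PySem.Dict Int Int × Int) (i : Int) :
    PySem.Dict Int Int × Int :=
  let v := f (i + 1)
  let cnt := s.1.insert v (s.1.getD v 0 + 1)
  let count := if f i == T - f (i + 1) then s.2 + cnt.getD (2 * f i) 0 else s.2
  (cnt, count)

def pvCsum (f : Int → Int) (T : Int) : List Int → Int
  | [] => 0
  | i :: t => pvCsum f T t +
      (if f i == T - f (i + 1)
       then (((i :: t).map (fun j => f (j + 1))).count (2 * f i) : Int) else 0)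

theorem pvFoldr_step (f : Int → Int) (T : Int) (is : List Int) :
    is.foldr (fun i s => pvStep f T s i) (PySem.Dict.empty, 0)
      = ( ((is.map (fun i => f (i + 1))).reverse).foldl
            (fun d v => d.insert v (d.getD v 0 + 1)) PySem.Dict.empty,
          pvCsum f T is ) := by
  induction is with
  | nil => simp [pvCsum]
  | cons i t ih =>
      rw [List.foldr_cons, ih]
      show pvStep f T _ i = _
      rw [pvStep]
      simp only []
      rw [List.map_cons, List.reverse_cons, List.foldl_append, List.foldl_cons, List.foldl_nil]
      apply Prod.ext
      · rfl
      · show (if (f i == T - f (i + 1)) = true then _ else _) = pvCsum f T (i :: t)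
        rw [pvCsum]
        split_ifs with hg
        · congr 1
          have key : ∀ (D : PySem.Dict Int Int) (w : Int),
              D.insert w (D.getD w 0 + 1)
                = List.foldl (fun d x => d.insert x (d.getD x 0 + 1)) D [w] :=
            fun _ _ => rfl
          rw [key, ← List.foldl_append]
          rw [PySem.Dict.getD_foldl_insert_add_one, PySem.Dict.getD_empty]
          simp [List.count_append, List.count_reverse, List.count_cons]
        · omega

theorem pvCount_if (f : Int → Int) (T a : Int) (L : List Int) :
    (if f a == T - f (a + 1)
     then ((L.map (fun j => f (j + 1))).count (2 * f a) : Int) else 0)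
      = (L.countP (fun j =>
          (f a == f (j + 1) - f a) && (f (j + 1) - f a == T - f (a + 1))) : Int) := by
  by_cases hg : f a = T - f (a + 1)
  · rw [if_pos (by simpa using hg)]
    congr 1
    rw [List.count_eq_countP, List.countP_map]
    apply List.countP_congr
    intro j _
    simp only [Function.comp_apply, beq_iff_eq, Bool.and_eq_true]
    constructor
    · intro h
      exact ⟨by omega, by omega⟩
    · intro h
      obtain ⟨h1, h2⟩ := h
      omega
  · rw [if_neg (by simpa using hg)]
    symm
    simp only [Int.natCast_eq_zero]
    rw [List.countP_eq_zero]
    intro j _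
    simp only [Bool.and_eq_true, beq_iff_eq, not_and]
    intro h1 h2
    exact absurd (by omega : f a = T - f (a + 1)) hg

theorem pvCsum_eq_sum (f : Int → Int) (T b : Int) :
    ∀ (m : ℕ) (a : Int), b - a ≤ m →
    pvCsum f T (PySem.List.pyRange a b 1)
      = ((PySem.List.pyRange a b 1).map (fun i =>
          ((PySem.List.pyRange i b 1).countP (fun j =>
            (f i == f (j + 1) - f i) && (f (j + 1) - f i == T - f (i + 1))) : Int))).sum := by
  intro m
  induction m with
  | zero =>
      intro a h
      rw [PySem.List.pyRange_one_eq_nil (by omega)]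
      simp [pvCsum]
  | succ m ih =>
      intro a h
      by_cases hab : b ≤ a
      · rw [PySem.List.pyRange_one_eq_nil hab]
        simp [pvCsum]
      · have hab' : a < b := by omega
        clear hab
        have hab := hab'
        rw [PySem.List.pyRange_one_cons hab]
        rw [List.map_cons, List.sum_cons]
        rw [pvCsum]
        rw [← PySem.List.pyRange_one_cons hab]
        rw [pvCount_if]
        rw [ih (a + 1) (by omega)]
        omega

theorem pvMain (f : Int → Int) (T : Int) (N : Int) :
    (PySem.List.pyRange 0 N 1).foldl (fun count i =>
      (PySem.List.pyRange i N 1).foldl (fun c j =>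
        if (f i == f (j + 1) - f i) && (f (j + 1) - f i == T - f (i + 1)) then c + 1 else c)
        count) 0
    = ((PySem.List.pyRange (N - 1) (-1) (-1)).foldl (fun s i => pvStep f T s i)
        (PySem.Dict.empty, 0)).2 := by
  simp only [PySem.List.foldl_if_add_one]
  rw [PySem.List.foldl_add]
  rw [PySem.List.pyRange_neg_one_eq_reverse, show ((-1 : Int) + 1) = 0 by norm_num,
    show N - 1 + 1 = N by ring]
  rw [List.foldl_reverse]
  rw [show (fun (x : Int) (y : PySem.Dict Int Int × Int) => pvStep f T y x)
      = (fun i s => pvStep f T s i) from rfl]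
  rw [pvFoldr_step]
  rw [pvCsum_eq_sum f T N N.toNat 0 (by omega)]
  omega

theorem pvSolve_eq (l : List Int) : solve l = solve_alt l := by
  by_cases hl : l = []
  · subst hl
    rfl
  · rw [solve, solve_alt]
    rw [if_neg (by simpa using hl), if_neg hl]
    have h := pvMain (fun k => PySem.List.pyGetD (pvAccL l) k 0) l.sum (1 + (l.length : Int))
    rw [show (1 + (l.length : Int)) - 1 = (l.length : Int) by ring] at h
    simp only [pvStep] at h
    simp only [pvAccA_eq l hl, pvAccB_eq l, pvLast_prefix l, pvLast_accL l]
    rw [show ((List.range (l.length + 1)).map (fun k => (l.take k).sum)) ++ [l.sum] = pvAccL l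
      from rfl]
    exact h


-- ===== VERDICT (by name: the statement is the Claim_ definition above) =====
theorem solve_spec : Claim_equal_solve := by
  intro l _
  unfold Spec_solve
  exact pvSolve_eq l
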